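-- pv_equiv track=rewrite | github.com/wyattclarke/hoaproxy | hoaware/discovery/state_verify.py | verify_state
-- ===== SOURCE A (Python) =====
-- from typing import NamedTuple
--
-- class StateMatch(NamedTuple):
--     state: str | None  # "CA", "NC", etc.
--     confidence: str  # "high", "medium", "low"
--     evidence: str  # Why we matched it
--
-- _STATE_ABBR = {
--     "california": "CA",
--     "north carolina": "NC",
--     "south carolina": "SC",
--     "virginia": "VA",
--     "georgia": "GA",
--     "texas": "TX",
--     "florida": "FL",
--     "new york": "NY",
--     "pennsylvania": "PA",
--     "maryland": "MD",
--     "new jersey": "NJ",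
--     "connecticut": "CT",
--     "massachusetts": "MA",
--     "rhode island": "RI",
--     "vermont": "VT",
--     "new hampshire": "NH",
--     "maine": "ME",
--     "delaware": "DE",
--     "colorado": "CO",
--     "utah": "UT",
--     "arizona": "AZ",
--     "nevada": "NV",
--     "washington": "WA",
--     "oregon": "OR",
--     "idaho": "ID",
--     "montana": "MT",
--     "wyoming": "WY",
--     "new mexico": "NM",
--     "illinois": "IL",
--     "indiana": "IN",
--     "ohio": "OH",
--     "michigan": "MI",
--     "wisconsin": "WI",
--     "minnesota": "MN",
--     "iowa": "IA",
--     "missouri": "MO",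
--     "kansas": "KS",
--     "nebraska": "NE",
--     "south dakota": "SD",
--     "north dakota": "ND",
--     "oklahoma": "OK",
--     "arkansas": "AR",
--     "louisiana": "LA",
--     "mississippi": "MS",
--     "alabama": "AL",
--     "tennessee": "TN",
--     "kentucky": "KY",
--     "west virginia": "WV",
--     "hawaii": "HI",
--     "alaska": "AK",
-- }
--
-- def verify_state(text: str, expected_state: str | None) -> StateMatch:
--     """Extract state from page-1 text of a PDF.
--
--     If expected_state is provided, bump confidence if it's found.
--     """
--     if not text or len(text) < 10:
--         return StateMatch(None, "low", "page too short")
--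
--     text_lower = text.lower()
--
--     # Look for explicit state names or abbreviations
--     for full_name, abbr in _STATE_ABBR.items():
--         if full_name in text_lower or abbr in text_lower.split():
--             # If we have an expected state, verify match
--             if expected_state and abbr != expected_state:
--                 continue
--             conf = "high" if expected_state and abbr == expected_state else "medium"
--             return StateMatch(abbr, conf, f"found '{full_name}' or '{abbr}'")
--
--     # Fallback: if expected_state was provided, assume it's correct
--     if expected_state:
--         return StateMatch(expected_state, "low", "assumed from lead")
--
--     return StateMatch(None, "low", "no state found in text")
-- ===== SOURCE B (Python) =====
-- from typing import NamedTuple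
--
-- class StateMatch(NamedTuple):
--     state: str | None
--     confidence: str
--     evidence: str
--
-- _STATE_ABBR = {
--     "california": "CA", "north carolina": "NC", "south carolina": "SC",
--     "virginia": "VA", "georgia": "GA", "texas": "TX", "florida": "FL",
--     "new york": "NY", "pennsylvania": "PA", "maryland": "MD", "new jersey": "NJ",
--     "connecticut": "CT", "massachusetts": "MA", "rhode island": "RI",
--     "vermont": "VT", "new hampshire": "NH", "maine": "ME", "delaware": "DE",
--     "colorado": "CO", "utah": "UT", "arizona": "AZ", "nevada": "NV",
--     "washington": "WA", "oregon": "OR", "idaho": "ID", "montana": "MT",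
--     "wyoming": "WY", "new mexico": "NM", "illinois": "IL", "indiana": "IN",
--     "ohio": "OH", "michigan": "MI", "wisconsin": "WI", "minnesota": "MN",
--     "iowa": "IA", "missouri": "MO", "kansas": "KS", "nebraska": "NE",
--     "south dakota": "SD", "north dakota": "ND", "oklahoma": "OK",
--     "arkansas": "AR", "louisiana": "LA", "mississippi": "MS", "alabama": "AL",
--     "tennessee": "TN", "kentucky": "KY", "west virginia": "WV",
--     "hawaii": "HI", "alaska": "AK",
-- }
--
-- def verify_state(text: str, expected_state: str | None) -> StateMatch:
--     if not text or len(text) < 10: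
--         return StateMatch(None, "low", "page too short")
--
--     text_lower = text.lower()
--
--     if expected_state:
--         # the abbreviations are unique, so look up the single relevant entry
--         full_name = next((n for n, a in _STATE_ABBR.items() if a == expected_state), None)
--         if full_name is not None and (full_name in text_lower or expected_state in text_lower.split()):
--             return StateMatch(expected_state, "high", f"found '{full_name}' or '{expected_state}'")
--         return StateMatch(expected_state, "low", "assumed from lead")
--
--     for full_name, abbr in _STATE_ABBR.items():
--         if full_name in text_lower or abbr in text_lower.split():
--             return StateMatch(abbr, "medium", f"found '{full_name}' or '{abbr}'")
--
--     return StateMatch(None, "low", "no state found in text")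
-- ===== Notes on version B (the rewrite author's own statement) =====
-- stated objective: simpler
-- what changed: B branches on expected_state first: when it is provided, the unique matching dictionary entry is found once and tested directly instead of filtering every state inside the scan loop with continue; the scan over all states remains only in the no-expected-state branch.
import Mathlib
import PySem

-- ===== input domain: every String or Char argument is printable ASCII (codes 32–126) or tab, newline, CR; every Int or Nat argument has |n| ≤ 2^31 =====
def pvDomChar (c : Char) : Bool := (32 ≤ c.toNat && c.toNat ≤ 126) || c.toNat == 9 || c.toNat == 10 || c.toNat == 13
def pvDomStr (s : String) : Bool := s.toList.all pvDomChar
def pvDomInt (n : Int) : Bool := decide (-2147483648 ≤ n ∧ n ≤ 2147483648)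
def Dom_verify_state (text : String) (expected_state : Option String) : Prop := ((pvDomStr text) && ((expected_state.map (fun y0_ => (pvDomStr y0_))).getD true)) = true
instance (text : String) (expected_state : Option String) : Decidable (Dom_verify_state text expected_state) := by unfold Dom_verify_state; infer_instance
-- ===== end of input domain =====

-- B branches on expected_state first and looks up the single entry with that abbreviation
-- instead of filtering every state inside the scan loop (objective: simpler).

-- ===== PORT A =====
def pvStateAbbr : List (String × String) := [
  ("california", "CA"), ("north carolina", "NC"), ("south carolina", "SC"),
  ("virginia", "VA"), ("georgia", "GA"), ("texas", "TX"), ("florida", "FL"),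
  ("new york", "NY"), ("pennsylvania", "PA"), ("maryland", "MD"),
  ("new jersey", "NJ"), ("connecticut", "CT"), ("massachusetts", "MA"),
  ("rhode island", "RI"), ("vermont", "VT"), ("new hampshire", "NH"),
  ("maine", "ME"), ("delaware", "DE"), ("colorado", "CO"), ("utah", "UT"),
  ("arizona", "AZ"), ("nevada", "NV"), ("washington", "WA"), ("oregon", "OR"),
  ("idaho", "ID"), ("montana", "MT"), ("wyoming", "WY"), ("new mexico", "NM"),
  ("illinois", "IL"), ("indiana", "IN"), ("ohio", "OH"), ("michigan", "MI"),
  ("wisconsin", "WI"), ("minnesota", "MN"), ("iowa", "IA"), ("missouri", "MO"),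
  ("kansas", "KS"), ("nebraska", "NE"), ("south dakota", "SD"),
  ("north dakota", "ND"), ("oklahoma", "OK"), ("arkansas", "AR"),
  ("louisiana", "LA"), ("mississippi", "MS"), ("alabama", "AL"),
  ("tennessee", "TN"), ("kentucky", "KY"), ("west virginia", "WV"),
  ("hawaii", "HI"), ("alaska", "AK")]

-- Python truthiness of `expected_state : str | None`
def pvEsTruthy : Option String → Bool
  | none => false
  | some s => !(s == "")

-- A's `for full_name, abbr in _STATE_ABBR.items(): …` loop plus the code after it
def pvLoopA (tl : String) (es : Option String) : List (String × String) → Option String × String × String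
  | [] =>
      if pvEsTruthy es then (some (es.getD ""), "low", "assumed from lead")
      else (none, "low", "no state found in text")
  | (full_name, abbr) :: rest =>
      if PySem.Str.isIn full_name tl || (PySem.Str.split₀ tl).contains abbr then
        if pvEsTruthy es && abbr != es.getD "" then pvLoopA tl es rest
        else (some abbr,
              (if pvEsTruthy es && abbr == es.getD "" then "high" else "medium"),
              "found '" ++ full_name ++ "' or '" ++ abbr ++ "'")
      else pvLoopA tl es rest

def verify_state (text : String) (expected_state : Option String) : Option String × String × String :=
  if text == "" || PySem.Str.len text < 10 then (none, "low", "page too short")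
  else
    let text_lower := PySem.Str.lower text
    pvLoopA text_lower expected_state pvStateAbbr

-- ===== PORT B =====
-- B's scan loop, used only when no expected_state was provided
def pvLoopB (tl : String) : List (String × String) → Option String × String × String
  | [] => (none, "low", "no state found in text")
  | (full_name, abbr) :: rest =>
      if PySem.Str.isIn full_name tl || (PySem.Str.split₀ tl).contains abbr then
        (some abbr, "medium", "found '" ++ full_name ++ "' or '" ++ abbr ++ "'")
      else pvLoopB tl rest

def verify_state_alt (text : String) (expected_state : Option String) : Option String × String × String :=
  if text == "" || PySem.Str.len text < 10 then (none, "low", "page too short")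
  else
    let text_lower := PySem.Str.lower text
    if pvEsTruthy expected_state then
      let e := expected_state.getD ""
      match pvStateAbbr.find? (fun p => p.2 == e) with
      | some (full_name, _) =>
          if PySem.Str.isIn full_name text_lower || (PySem.Str.split₀ text_lower).contains e then
            (some e, "high", "found '" ++ full_name ++ "' or '" ++ e ++ "'")
          else (some e, "low", "assumed from lead")
      | none => (some e, "low", "assumed from lead")
    else pvLoopB text_lower pvStateAbbr

-- ===== PRECONDITION & SPEC =====
def Spec_verify_state (text : String) (expected_state : Option String) (out : Option String × String × String) : Prop := out = verify_state_alt text expected_state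
instance (text : String) (expected_state : Option String) (out : Option String × String × String) : Decidable (Spec_verify_state text expected_state out) := by unfold Spec_verify_state; infer_instance

-- ===== CLAIM (what is proved, stated in full; the proofs are below) =====
def Claim_equal_verify_state : Prop := ∀ (text : String) (expected_state : Option String), Dom_verify_state text expected_state → Spec_verify_state text expected_state (verify_state text expected_state)

-- ===== LEMMAS AND PROOFS =====

-- When expected_state is falsy, A's loop is exactly B's plain scan.
theorem pvLoopA_falsy (tl : String) (es : Option String) (h : pvEsTruthy es = false) :
    ∀ l, pvLoopA tl es l = pvLoopB tl l := by
  intro l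
  induction l with
  | nil => simp [pvLoopA, pvLoopB, h]
  | cons p rest ih =>
      obtain ⟨n, a⟩ := p
      simp [pvLoopA, pvLoopB, h, ih]

-- When e is not an abbreviation in l, A's loop always falls through to the fallback.
theorem pvLoopA_absent (tl : String) (e : String) (he : e ≠ "") :
    ∀ l : List (String × String), e ∉ l.map Prod.snd →
      pvLoopA tl (some e) l = (some e, "low", "assumed from lead") := by
  intro l
  induction l with
  | nil => intro _; simp [pvLoopA, pvEsTruthy, he]
  | cons p rest ih =>
      intro hmem
      obtain ⟨n, a⟩ := p
      simp only [List.map_cons, List.mem_cons, not_or] at hmem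
      have hne : a ≠ e := fun h => hmem.1 h.symm
      simp [pvLoopA, pvEsTruthy, he, hne, ih hmem.2]

-- With a truthy expected_state and distinct abbreviations, A's filtered scan is
-- B's single lookup-and-test.
theorem pvLoopA_truthy (tl : String) (e : String) (he : e ≠ "") :
    ∀ l : List (String × String), (l.map Prod.snd).Nodup →
      pvLoopA tl (some e) l =
        (match l.find? (fun p => p.2 == e) with
         | some (n, _) =>
             if PySem.Str.isIn n tl || (PySem.Str.split₀ tl).contains e then
               (some e, "high", "found '" ++ n ++ "' or '" ++ e ++ "'")
             else (some e, "low", "assumed from lead")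
         | none => (some e, "low", "assumed from lead")) := by
  intro l
  induction l with
  | nil => intro _; simp [pvLoopA, pvEsTruthy, he]
  | cons p rest ih =>
      intro hnd
      obtain ⟨n, a⟩ := p
      simp only [List.map_cons, List.nodup_cons] at hnd
      by_cases hae : a = e
      · subst hae
        simp only [List.find?_cons, beq_self_eq_true]
        simp [pvLoopA, pvEsTruthy, he, pvLoopA_absent tl a he rest hnd.1]
      · have hbe : (a == e) = false := by simp [hae]
        simp only [List.find?_cons, hbe]
        rw [← ih hnd.2]
        simp [pvLoopA, pvEsTruthy, he, hae]

-- The 50 abbreviations in the table are pairwise distinct.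
theorem pvStateAbbr_nodup : (pvStateAbbr.map Prod.snd).Nodup := by decide

-- ===== VERDICT (by name: the statement is the Claim_ definition above) =====
theorem verify_state_spec : Claim_equal_verify_state := by
  intro text es _
  unfold Spec_verify_state verify_state verify_state_alt
  by_cases hg : (text == "" || decide (PySem.Str.len text < 10)) = true
  · rw [if_pos hg, if_pos hg]
  · rw [if_neg hg, if_neg hg]
    by_cases ht : pvEsTruthy es = true
    · obtain ⟨e, rfl⟩ : ∃ e, es = some e := by
        cases es with
        | none => simp [pvEsTruthy] at ht
        | some e => exact ⟨e, rfl⟩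
      have he : e ≠ "" := by simp [pvEsTruthy] at ht; exact ht
      rw [if_pos ht]
      exact pvLoopA_truthy (PySem.Str.lower text) e he pvStateAbbr pvStateAbbr_nodup
    · rw [if_neg ht]
      exact pvLoopA_falsy (PySem.Str.lower text) es (by simpa using ht) pvStateAbbr
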